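-- pv_equiv track=rewrite | github.com/pypi-data/pypi-mirror-399 | packages/rhinotype/rhinotype-2.0.0.tar.gz/rhinotype-2.0.0/src/rhinotype/distance_helpers.py | _count_substitutions_k2p
-- ===== SOURCE A (Python) =====
-- def _count_substitutions_k2p(seq1, seq2):
--     """
--     Correctly counts transitions and transversions using pairwise deletion.
--     This function is the new core logic for K2P.
--     """
--     transitions = 0
--     transversions = 0
--     length = 0
--
--     purines = {'A', 'G'}
--     pyrimidines = {'C', 'T'}
--
--     for n1, n2 in zip(seq1, seq2):
--         b1 = n1.upper()
--         b2 = n2.upper()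
--
--         # Pairwise deletion: Skip sites with gaps or ambiguous characters
--         if b1 not in "ACGT" or b2 not in "ACGT":
--             continue
--
--         length += 1
--
--         if b1 == b2:
--             continue
--
--         # Check for transition
--         if (b1 in purines and b2 in purines) or \
--            (b1 in pyrimidines and b2 in pyrimidines):
--             transitions += 1
--         # Otherwise, it's a transversion
--         else:
--             transversions += 1
--
--     # Return length (L), transitions (S), and transversions (V)
--     return length, transitions, transversions
-- ===== SOURCE B (Python) =====
-- def _count_substitutions_k2p(seq1, seq2):
--     """Table-aggregation re-implementation: collect valid uppercased pairs once,
--     then read transitions/matches off fixed pair tables after the loop."""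
--     valid = "ACGT"
--     pairs = [n1.upper() + n2.upper() for n1, n2 in zip(seq1, seq2)]
--     pairs = [p for p in pairs if p[0] in valid and p[1] in valid]
--     length = len(pairs)
--     transitions = sum(pairs.count(p) for p in ("AG", "GA", "CT", "TC"))
--     matches = sum(pairs.count(p) for p in ("AA", "CC", "GG", "TT"))
--     return length, transitions, length - transitions - matches
-- ===== Notes on version B (the rewrite author's own statement) =====
-- stated objective: alternative
-- what changed: A classifies each site inside the loop with purine/pyrimidine branching and three running counters; B makes one filtering pass that just collects uppercased valid pairs, then computes length as the list length, transitions as the summed counts of the four transition pairs, and transversions as length minus transitions minus the summed counts of the four matched pairs.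
import Mathlib
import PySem

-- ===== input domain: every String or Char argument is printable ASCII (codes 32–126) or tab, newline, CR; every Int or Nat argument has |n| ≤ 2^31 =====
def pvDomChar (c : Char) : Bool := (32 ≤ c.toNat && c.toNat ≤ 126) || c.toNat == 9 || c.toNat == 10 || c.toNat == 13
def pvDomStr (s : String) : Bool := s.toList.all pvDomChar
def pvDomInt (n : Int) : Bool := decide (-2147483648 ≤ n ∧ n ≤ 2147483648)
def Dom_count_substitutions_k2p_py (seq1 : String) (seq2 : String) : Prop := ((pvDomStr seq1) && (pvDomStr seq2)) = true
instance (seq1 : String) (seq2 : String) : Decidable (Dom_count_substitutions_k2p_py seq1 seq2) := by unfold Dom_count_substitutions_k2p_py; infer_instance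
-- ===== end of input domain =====

-- B replaces A's per-site transition/transversion branching by one filtering pass that collects the
-- valid uppercased pairs, then reads transitions/matches off fixed pair tables (objective: alternative).

-- ===== PORT A =====
-- A's loop body, named so the proofs can speak about it; branches in A's order
-- (skip invalid site, skip equal bases, transition test, else transversion);
-- accumulator = (transitions, transversions, length)
def pvBodyA (acc : Int × Int × Int) (p : Char × Char) : Int × Int × Int :=
  let b1 := PySem.Chars.upperChar p.1
  let b2 := PySem.Chars.upperChar p.2
  if b1 ∉ ['A','C','G','T'] ∨ b2 ∉ ['A','C','G','T'] then acc
  else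
    let len := acc.2.2 + 1
    if b1 = b2 then (acc.1, acc.2.1, len)
    else if (b1 ∈ ['A','G'] ∧ b2 ∈ ['A','G']) ∨ (b1 ∈ ['C','T'] ∧ b2 ∈ ['C','T']) then
      (acc.1 + 1, acc.2.1, len)
    else (acc.1, acc.2.1 + 1, len)

def count_substitutions_k2p_py (seq1 : String) (seq2 : String) : Int × Int × Int :=
  let r := (seq1.toList.zip seq2.toList).foldl pvBodyA ((0 : Int), (0 : Int), (0 : Int))
  (r.2.2, r.1, r.2.1)

-- ===== PORT B =====
-- literal transliteration of Source B; the 2-char pair strings are represented as Char × Char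
def count_substitutions_k2p_py_alt (seq1 : String) (seq2 : String) : Int × Int × Int :=
  let pairs := (seq1.toList.zip seq2.toList).map
      (fun p => (PySem.Chars.upperChar p.1, PySem.Chars.upperChar p.2))
  let pairs := pairs.filter (fun p => p.1 ∈ ['A','C','G','T'] && p.2 ∈ ['A','C','G','T'])
  let length : Int := PySem.List.len pairs
  let transitions : Int :=
    ([('A','G'),('G','A'),('C','T'),('T','C')].map (fun q => (pairs.count q : Int))).sum
  let matched : Int :=
    ([('A','A'),('C','C'),('G','G'),('T','T')].map (fun q => (pairs.count q : Int))).sum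
  (length, transitions, length - transitions - matched)

-- ===== PRECONDITION & SPEC =====
def Spec_count_substitutions_k2p_py (seq1 : String) (seq2 : String) (out : Int × Int × Int) : Prop := out = count_substitutions_k2p_py_alt seq1 seq2
instance (seq1 : String) (seq2 : String) (out : Int × Int × Int) : Decidable (Spec_count_substitutions_k2p_py seq1 seq2 out) := by unfold Spec_count_substitutions_k2p_py; infer_instance

-- ===== CLAIM (what is proved, stated in full; the proofs are below) =====
def Claim_equal_count_substitutions_k2p_py : Prop := ∀ (seq1 : String) (seq2 : String), Dom_count_substitutions_k2p_py seq1 seq2 → Spec_count_substitutions_k2p_py seq1 seq2 (count_substitutions_k2p_py seq1 seq2)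

-- ===== LEMMAS AND PROOFS =====

-- B's per-site view: the uppercased pair, its validity test, and its two table memberships
def pvUp (p : Char × Char) : Char × Char := (PySem.Chars.upperChar p.1, PySem.Chars.upperChar p.2)
def pvValid (u : Char × Char) : Bool := u.1 ∈ ['A','C','G','T'] && u.2 ∈ ['A','C','G','T']
def pvSt (u : Char × Char) : Int := if u ∈ [('A','G'),('G','A'),('C','T'),('T','C')] then 1 else 0
def pvMt (u : Char × Char) : Int := if u ∈ [('A','A'),('C','C'),('G','G'),('T','T')] then 1 else 0

-- B's filtered pair list and its three aggregates, as functions of the zipped input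
def pvF (l : List (Char × Char)) : List (Char × Char) :=
  (l.map pvUp).filter pvValid
def pvL (l : List (Char × Char)) : Int := PySem.List.len (pvF l)
def pvS (l : List (Char × Char)) : Int :=
  ([('A','G'),('G','A'),('C','T'),('T','C')].map (fun q => ((pvF l).count q : Int))).sum
def pvM (l : List (Char × Char)) : Int :=
  ([('A','A'),('C','C'),('G','G'),('T','T')].map (fun q => ((pvF l).count q : Int))).sum

theorem pvF_cons (p : Char × Char) (l : List (Char × Char)) :
    pvF (p :: l) = if pvValid (pvUp p) then pvUp p :: pvF l else pvF l := by
  simp [pvF, List.filter_cons]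

-- a sum of counts of distinct keys grows by 1 on a cons iff the new head is one of the keys
theorem pvSum_count_cons (qs : List (Char × Char)) (hq : qs.Nodup) (u : Char × Char)
    (t : List (Char × Char)) :
    (qs.map (fun q => (((u :: t).count q : Nat) : Int))).sum
      = (qs.map (fun q => ((t.count q : Nat) : Int))).sum + (if u ∈ qs then 1 else 0) := by
  induction qs with
  | nil => simp
  | cons q qs ih =>
    rw [List.nodup_cons] at hq
    simp only [List.map_cons, List.sum_cons, List.mem_cons]
    rw [ih hq.2]
    by_cases h : u = q
    · have hn : u ∉ qs := h ▸ hq.1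
      subst h
      simp [List.count_cons_self, hn]
      ring
    · have : (u :: t).count q = t.count q := by
        simp [h]
      rw [this]
      by_cases h2 : u ∈ qs <;> simp [h, h2] <;> ring

-- A's loop body, rewritten as B's table increments
theorem pvBodyA_eq (acc : Int × Int × Int) (p : Char × Char) :
    pvBodyA acc p =
      if pvValid (pvUp p) then
        (acc.1 + pvSt (pvUp p), acc.2.1 + (1 - pvSt (pvUp p) - pvMt (pvUp p)), acc.2.2 + 1)
      else acc := by
  by_cases h1 : PySem.Chars.upperChar p.1 ∈ ['A','C','G','T']
  · by_cases h2 : PySem.Chars.upperChar p.2 ∈ ['A','C','G','T']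
    · simp only [List.mem_cons, List.not_mem_nil, or_false] at h1 h2
      rcases h1 with h1 | h1 | h1 | h1 <;> rcases h2 with h2 | h2 | h2 | h2 <;>
        simp [pvBodyA, pvValid, pvUp, pvSt, pvMt, h1, h2]
    · simp [pvBodyA, pvValid, pvUp, h2]
  · simp [pvBodyA, pvValid, pvUp, h1]

-- loop invariant: A's fold adds (S, V, L) of the remaining list to its accumulator
theorem pvFold_eq (l : List (Char × Char)) : ∀ (t v n : Int),
    l.foldl pvBodyA (t, v, n) = (t + pvS l, v + (pvL l - pvS l - pvM l), n + pvL l) := by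
  induction l with
  | nil => intro t v n; simp [pvS, pvL, pvM, pvF, PySem.List.len]
  | cons p l ih =>
    intro t v n
    rw [List.foldl_cons, pvBodyA_eq]
    by_cases hv : pvValid (pvUp p) = true
    · have hS : pvS (p :: l) = pvS l + pvSt (pvUp p) := by
        unfold pvS pvSt
        rw [pvF_cons, if_pos hv, pvSum_count_cons _ (by decide)]
      have hM : pvM (p :: l) = pvM l + pvMt (pvUp p) := by
        unfold pvM pvMt
        rw [pvF_cons, if_pos hv, pvSum_count_cons _ (by decide)]
      have hL : pvL (p :: l) = pvL l + 1 := by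
        unfold pvL
        rw [pvF_cons, if_pos hv]
        simp [PySem.List.len]
      rw [if_pos hv, ih, hS, hM, hL]
      simp only [Prod.mk.injEq]
      refine ⟨by ring, by ring, by ring⟩
    · have hS : pvS (p :: l) = pvS l := by unfold pvS; rw [pvF_cons, if_neg hv]
      have hM : pvM (p :: l) = pvM l := by unfold pvM; rw [pvF_cons, if_neg hv]
      have hL : pvL (p :: l) = pvL l := by unfold pvL; rw [pvF_cons, if_neg hv]
      rw [if_neg hv, ih, hS, hM, hL]

-- ===== VERDICT (by name: the statement is the Claim_ definition above) =====
theorem count_substitutions_k2p_py_spec : Claim_equal_count_substitutions_k2p_py := by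
  intro seq1 seq2 _
  unfold Spec_count_substitutions_k2p_py count_substitutions_k2p_py count_substitutions_k2p_py_alt
  rw [pvFold_eq]
  simp only [zero_add]
  rfl
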